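-- pv_equiv track=rewrite | github.com/obrienb90/assig1 | main.py | queryIsEmpty
-- ===== SOURCE A (Python) =====
-- def queryIsEmpty(query):
--     list = []
--     for doc in query:
--         list.append(doc)
--     if len(list) == 0:
--         return True
--     else:
--         return False
-- ===== SOURCE B (Python) =====
-- def queryIsEmpty(query):
--     for doc in query:
--         return False
--     return True
-- ===== Notes on version B (the rewrite author's own statement) =====
-- stated objective: simpler
-- what changed: Instead of materializing all documents into a list and testing its length, B returns False immediately upon seeing the first document and True only if the loop finishes empty-handed, keeping no accumulator.
import Mathlib
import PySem

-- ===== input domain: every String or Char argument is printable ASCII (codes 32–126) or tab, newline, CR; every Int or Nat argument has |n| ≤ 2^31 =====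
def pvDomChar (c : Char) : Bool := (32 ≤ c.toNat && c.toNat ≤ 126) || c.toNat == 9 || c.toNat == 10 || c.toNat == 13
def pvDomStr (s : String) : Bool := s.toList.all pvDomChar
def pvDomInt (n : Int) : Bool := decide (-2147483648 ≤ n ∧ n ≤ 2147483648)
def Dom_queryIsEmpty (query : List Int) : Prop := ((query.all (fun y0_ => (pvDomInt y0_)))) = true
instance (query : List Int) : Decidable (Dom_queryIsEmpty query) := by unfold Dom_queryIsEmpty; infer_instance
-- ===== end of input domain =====

-- B drops A's build-a-list-then-len check: it early-returns False on the first document, True if the loop ends.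

-- ===== PORT A =====
-- A: copy every element into an accumulator list, then test len == 0
def queryIsEmpty (query : List Int) : Bool :=
  let l := query.foldl (fun acc doc => acc ++ [doc]) []
  if l.length = 0 then true else false

-- ===== PORT B =====
-- B: loop with early return: first element ⇒ False; loop exhausted ⇒ True
def queryIsEmpty_alt (query : List Int) : Bool :=
  match query with
  | _ :: _ => false
  | [] => true

-- ===== PRECONDITION & SPEC =====
def Spec_queryIsEmpty (query : List Int) (out : Bool) : Prop := out = queryIsEmpty_alt query
instance (query : List Int) (out : Bool) : Decidable (Spec_queryIsEmpty query out) := by unfold Spec_queryIsEmpty; infer_instance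

-- ===== CLAIM (what is proved, stated in full; the proofs are below) =====
def Claim_equal_queryIsEmpty : Prop := ∀ (query : List Int), Dom_queryIsEmpty query → Spec_queryIsEmpty query (queryIsEmpty query)

-- ===== LEMMAS AND PROOFS =====

-- ===== VERDICT (by name: the statement is the Claim_ definition above) =====
theorem queryIsEmpty_spec : Claim_equal_queryIsEmpty := by
  intro query _
  unfold Spec_queryIsEmpty queryIsEmpty queryIsEmpty_alt
  cases query with
  | nil => simp
  | cons h t => simp
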